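-- pv_equiv track=rewrite | github.com/agodaMarina/coworking-space-reservation | services/payment_gateway.py | _parse_phone
-- ===== SOURCE A (Python) =====
-- def _parse_phone(phone_number: str) -> tuple:
--     """Retourne (local_number, country_code) depuis un numéro international."""
--     clean = phone_number.strip().replace(' ', '').replace('-', '')
--     prefixes = {
--         '+228': 'tg', '00228': 'tg',
--         '+229': 'bj', '00229': 'bj',
--         '+225': 'ci', '00225': 'ci',
--         '+221': 'sn', '00221': 'sn',
--         '+226': 'bf', '00226': 'bf',
--     }
--     for prefix, country in prefixes.items():
--         if clean.startswith(prefix):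
--             return clean[len(prefix):], country
--     return clean.lstrip('0') or clean, 'tg'
-- ===== SOURCE B (Python) =====
-- def _parse_phone(phone_number: str) -> tuple:
--     """Retourne (local_number, country_code) depuis un numéro international."""
--     clean = phone_number.strip().replace(' ', '').replace('-', '')
--     codes = {'228': 'tg', '229': 'bj', '225': 'ci', '221': 'sn', '226': 'bf'}
--     if clean.startswith('+') and clean[1:4] in codes:
--         return clean[4:], codes[clean[1:4]]
--     if clean.startswith('00') and clean[2:5] in codes:
--         return clean[5:], codes[clean[2:5]]
--     return clean.lstrip('0') or clean, 'tg'
-- ===== Notes on version B (the rewrite author's own statement) =====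
-- stated objective: simpler
-- what changed: Replaces the loop over ten full international prefixes by normalizing the leading marker (plus sign or double zero) first and looking the bare 3-digit country code up in a single 5-entry table.
import Mathlib
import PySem

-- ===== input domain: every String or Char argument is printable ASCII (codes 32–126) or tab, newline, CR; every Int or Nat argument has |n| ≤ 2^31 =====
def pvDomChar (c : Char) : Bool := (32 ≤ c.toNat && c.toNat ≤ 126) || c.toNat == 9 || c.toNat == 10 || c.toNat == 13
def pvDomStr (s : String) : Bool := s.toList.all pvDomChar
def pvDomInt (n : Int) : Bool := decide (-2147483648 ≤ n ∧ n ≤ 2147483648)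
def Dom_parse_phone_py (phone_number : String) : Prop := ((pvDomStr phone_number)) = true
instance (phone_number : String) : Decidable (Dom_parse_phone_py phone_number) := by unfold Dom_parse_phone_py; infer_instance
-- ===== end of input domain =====

-- B replaces A's loop over ten full '+XXX'/'00XXX' prefixes by normalizing the marker ('+' or '00')
-- first and looking the bare 3-digit country code up in a table (objective: alternative decomposition).

-- ===== PORT A =====
-- clean = phone_number.strip().replace(' ', '').replace('-', '')   (shared: the identical line opens both A and B)
def pvClean (phone_number : String) : List Char :=
  PySem.Chars.replace (PySem.Chars.replace (PySem.Chars.strip phone_number.toList) [' '] []) ['-'] []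

-- the dict literal `prefixes`, iterated in insertion order
def pvPrefixesA : List (List Char × String) :=
  [("+228".toList, "tg"), ("00228".toList, "tg"),
   ("+229".toList, "bj"), ("00229".toList, "bj"),
   ("+225".toList, "ci"), ("00225".toList, "ci"),
   ("+221".toList, "sn"), ("00221".toList, "sn"),
   ("+226".toList, "bf"), ("00226".toList, "bf")]

-- the for-loop over prefixes.items(); the [] case is the final `return clean.lstrip('0') or clean, 'tg'`
-- (lstrip('0') hand-ported as dropWhile (· == '0'): exact, since the char set is the single char '0')
def pvLoopA : List (List Char × String) → List Char → String × String
  | [], clean =>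
      let r := clean.dropWhile (fun c => c == '0')
      (if r.isEmpty then String.ofList clean else String.ofList r, "tg")
  | (p, c) :: rest, clean =>
      if PySem.Chars.startswith clean p then
        (String.ofList (PySem.Chars.slice clean (some (p.length : Int)) none), c)
      else pvLoopA rest clean

def parse_phone_py (phone_number : String) : String × String :=
  pvLoopA pvPrefixesA (pvClean phone_number)

-- ===== PORT B =====
-- the dict literal `codes`
def pvCodesB : PySem.Dict (List Char) String :=
  PySem.Dict.ofList [("228".toList, "tg"), ("229".toList, "bj"), ("225".toList, "ci"),
                     ("221".toList, "sn"), ("226".toList, "bf")]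

-- B's body after the cleaning line (codes[k] after the `in` test ported as getD)
def pvCoreB (clean : List Char) : String × String :=
  if PySem.Chars.startswith clean ['+'] && pvCodesB.contains (PySem.Chars.slice clean (some 1) (some 4)) then
    (String.ofList (PySem.Chars.slice clean (some 4) none), pvCodesB.getD (PySem.Chars.slice clean (some 1) (some 4)) "tg")
  else if PySem.Chars.startswith clean ['0','0'] && pvCodesB.contains (PySem.Chars.slice clean (some 2) (some 5)) then
    (String.ofList (PySem.Chars.slice clean (some 5) none), pvCodesB.getD (PySem.Chars.slice clean (some 2) (some 5)) "tg")
  else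
    let r := clean.dropWhile (fun c => c == '0')
    (if r.isEmpty then String.ofList clean else String.ofList r, "tg")

def parse_phone_py_alt (phone_number : String) : String × String :=
  pvCoreB (pvClean phone_number)

-- ===== PRECONDITION & SPEC =====
def Spec_parse_phone_py (phone_number : String) (out : String × String) : Prop := out = parse_phone_py_alt phone_number
instance (phone_number : String) (out : String × String) : Decidable (Spec_parse_phone_py phone_number out) := by unfold Spec_parse_phone_py; infer_instance

-- ===== CLAIM (what is proved, stated in full; the proofs are below) =====
def Claim_equal_parse_phone_py : Prop := ∀ (phone_number : String), Dom_parse_phone_py phone_number → Spec_parse_phone_py phone_number (parse_phone_py phone_number)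

-- ===== LEMMAS AND PROOFS =====
theorem pvCodesB_eq : pvCodesB = PySem.Dict.mk [("228".toList, "tg"), ("229".toList, "bj"),
    ("225".toList, "ci"), ("221".toList, "sn"), ("226".toList, "bf")] := rfl

theorem pvSlice14 (a b c d : Char) (t : List Char) :
    PySem.List.slice (a::b::c::d::t) (some 1) (some 4) = [b,c,d] := by
  rw [PySem.List.slice_toNat _ (by norm_num) (by norm_num)]
  simp

theorem pvSlice25 (a b c d e : Char) (t : List Char) :
    PySem.List.slice (a::b::c::d::e::t) (some 2) (some 5) = [c,d,e] := by
  rw [PySem.List.slice_toNat _ (by norm_num) (by norm_num)]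
  simp

theorem pvSlice4 (a b c d : Char) (t : List Char) :
    PySem.List.slice (a::b::c::d::t) (some 4) none = t := by
  rw [PySem.List.slice_from _ (by norm_num)]
  simp

theorem pvSlice5 (a b c d e : Char) (t : List Char) :
    PySem.List.slice (a::b::c::d::e::t) (some 5) none = t := by
  rw [PySem.List.slice_from _ (by norm_num)]
  simp

theorem pvMain (cs : List Char) : pvLoopA pvPrefixesA cs = pvCoreB cs := by
  match cs with
  | [] => rfl
  | [a] =>
      simp [pvLoopA, pvPrefixesA, pvCoreB, pvCodesB_eq, PySem.Chars.startswith,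
        PySem.Dict.contains, PySem.Dict.getD, PySem.Dict.get?, List.isPrefixOf,
        PySem.List.slice, PySem.List.clampIdx]
  | [a, b] =>
      simp [pvLoopA, pvPrefixesA, pvCoreB, pvCodesB_eq, PySem.Chars.startswith,
        PySem.Dict.contains, PySem.Dict.getD, PySem.Dict.get?, List.isPrefixOf,
        PySem.List.slice, PySem.List.clampIdx]
  | [a, b, c] =>
      simp [pvLoopA, pvPrefixesA, pvCoreB, pvCodesB_eq, PySem.Chars.startswith,
        PySem.Dict.contains, PySem.Dict.getD, PySem.Dict.get?, List.isPrefixOf,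
        PySem.List.slice, PySem.List.clampIdx]
  | a :: b :: c :: d :: t =>
      by_cases ha : '+' = a
      · subst ha
        by_cases hb : '2' = b
        · subst hb
          by_cases hc : '2' = c
          · subst hc
            by_cases h8 : '8' = d
            · subst h8; rfl
            · by_cases h9 : '9' = d
              · subst h9; rfl
              · by_cases h5 : '5' = d
                · subst h5; rfl
                · by_cases h1 : '1' = d
                  · subst h1; rfl
                  · by_cases h6 : '6' = d
                    · subst h6; rfl
                    · simp [pvLoopA, pvPrefixesA, pvCoreB, pvCodesB_eq, PySem.Chars.startswith,
                        pvSlice14, pvSlice25, pvSlice4, pvSlice5,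
                        PySem.Dict.contains, PySem.Dict.getD, PySem.Dict.get?, List.isPrefixOf,
                        h8, h9, h5, h1, h6]
          · simp [pvLoopA, pvPrefixesA, pvCoreB, pvCodesB_eq, PySem.Chars.startswith,
              pvSlice14, pvSlice25, pvSlice4, pvSlice5,
              PySem.Dict.contains, PySem.Dict.getD, PySem.Dict.get?, List.isPrefixOf, hc]
        · simp [pvLoopA, pvPrefixesA, pvCoreB, pvCodesB_eq, PySem.Chars.startswith,
            pvSlice14, pvSlice25, pvSlice4, pvSlice5,
            PySem.Dict.contains, PySem.Dict.getD, PySem.Dict.get?, List.isPrefixOf, hb]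
      · by_cases ha0 : '0' = a
        · subst ha0
          by_cases hb0 : '0' = b
          · subst hb0
            match t with
            | [] =>
                simp [pvLoopA, pvPrefixesA, pvCoreB, pvCodesB_eq, PySem.Chars.startswith,
                  PySem.Dict.contains, PySem.Dict.getD, PySem.Dict.get?, List.isPrefixOf,
                  PySem.List.slice, PySem.List.clampIdx]
            | e :: t' =>
                by_cases hc : '2' = c
                · subst hc
                  by_cases hd : '2' = d
                  · subst hd
                    by_cases h8 : '8' = e
                    · subst h8; rfl
                    · by_cases h9 : '9' = e
                      · subst h9; rfl
                      · by_cases h5 : '5' = e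
                        · subst h5; rfl
                        · by_cases h1 : '1' = e
                          · subst h1; rfl
                          · by_cases h6 : '6' = e
                            · subst h6; rfl
                            · simp [pvLoopA, pvPrefixesA, pvCoreB, pvCodesB_eq, PySem.Chars.startswith,
                                pvSlice14, pvSlice25, pvSlice4, pvSlice5,
                                PySem.Dict.contains, PySem.Dict.getD, PySem.Dict.get?, List.isPrefixOf,
                                h8, h9, h5, h1, h6]
                  · simp [pvLoopA, pvPrefixesA, pvCoreB, pvCodesB_eq, PySem.Chars.startswith,
                      pvSlice14, pvSlice25, pvSlice4, pvSlice5,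
                      PySem.Dict.contains, PySem.Dict.getD, PySem.Dict.get?, List.isPrefixOf, hd]
                · simp [pvLoopA, pvPrefixesA, pvCoreB, pvCodesB_eq, PySem.Chars.startswith,
                    pvSlice14, pvSlice25, pvSlice4, pvSlice5,
                    PySem.Dict.contains, PySem.Dict.getD, PySem.Dict.get?, List.isPrefixOf, hc]
          · simp [pvLoopA, pvPrefixesA, pvCoreB, pvCodesB_eq, PySem.Chars.startswith,
              pvSlice14, pvSlice25, pvSlice4, pvSlice5,
              PySem.Dict.contains, PySem.Dict.getD, PySem.Dict.get?, List.isPrefixOf, hb0]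
        · simp [pvLoopA, pvPrefixesA, pvCoreB, pvCodesB_eq, PySem.Chars.startswith,
            pvSlice14, pvSlice25, pvSlice4, pvSlice5,
            PySem.Dict.contains, PySem.Dict.getD, PySem.Dict.get?, List.isPrefixOf, ha, ha0]

-- ===== VERDICT (by name: the statement is the Claim_ definition above) =====
theorem parse_phone_py_spec : Claim_equal_parse_phone_py := by
  intro phone_number _
  unfold Spec_parse_phone_py parse_phone_py parse_phone_py_alt
  exact pvMain (pvClean phone_number)
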